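-- pv_equiv track=rewrite | github.com/thotalakshmimounika/IntermediateDSA | Modular Arthematic/Mod Array.py | solve
-- ===== SOURCE A (Python) =====
-- def solve(a,b):
--     n=len(a)
--     p=1
--     ans=0
--     for i in range(n-1,-1,-1):
--         ans= (ans%b+(a[i]%b * (p)%b))%b
--         p= (p%b * 10%b)%b
--     return ans
-- ===== SOURCE B (Python) =====
-- def solve(a, b):
--     ans = 0
--     for x in a:
--         ans = (ans * 10 + x) % b
--     return ans
-- ===== Notes on version B (the rewrite author's own statement) =====
-- stated objective: idiomatic
-- what changed: Replaced the right-to-left scan that maintains a separate running power-of-ten p with a left-to-right Horner recurrence ans = (ans*10 + x) % b over the elements, eliminating p and the index loop.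
import Mathlib
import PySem

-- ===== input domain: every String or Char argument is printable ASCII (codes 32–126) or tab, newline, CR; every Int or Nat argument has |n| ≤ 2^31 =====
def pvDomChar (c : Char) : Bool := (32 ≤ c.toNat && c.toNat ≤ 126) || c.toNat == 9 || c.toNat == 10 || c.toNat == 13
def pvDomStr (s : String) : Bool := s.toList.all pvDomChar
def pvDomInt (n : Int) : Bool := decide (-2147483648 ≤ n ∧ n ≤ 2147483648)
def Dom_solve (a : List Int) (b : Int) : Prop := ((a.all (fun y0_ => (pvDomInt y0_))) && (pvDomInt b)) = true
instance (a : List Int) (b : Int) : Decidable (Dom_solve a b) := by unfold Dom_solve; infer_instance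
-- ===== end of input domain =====

-- B replaces A's right-to-left scan with a maintained power of ten by a left-to-right Horner
-- recurrence ans = (ans*10 + x) % b, eliminating the power variable (idiomatic, same O(n) cost).


-- ===== PORT A =====
def solve (a : List Int) (b : Int) : Int :=
  let n : Int := PySem.List.len a
  let s := (PySem.List.pyRange (n - 1) (-1) (-1)).foldl
    (fun (st : Int × Int) i =>
      (PySem.Int.mod (PySem.Int.mod st.1 b +
         PySem.Int.mod (PySem.Int.mod (PySem.List.pyGetD a i 0) b * st.2) b) b,
       PySem.Int.mod (PySem.Int.mod (PySem.Int.mod st.2 b * 10) b) b))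
    (0, 1)
  s.1

-- ===== PORT B =====
def solve_alt (a : List Int) (b : Int) : Int :=
  a.foldl (fun ans x => PySem.Int.mod (ans * 10 + x) b) 0

-- ===== PRECONDITION & SPEC =====
-- Pre_ excludes b = 0 with a nonempty list: there A (and B) raise ZeroDivisionError.
def Pre_solve (a : List Int) (b : Int) : Prop := a = [] ∨ b ≠ 0
instance (a : List Int) (b : Int) : Decidable (Pre_solve a b) := by unfold Pre_solve; infer_instance
def pvWitness_solve : List Int × Int := ([3, 1, 4], 7)
def Spec_solve (a : List Int) (b : Int) (out : Int) : Prop := out = solve_alt a b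
instance (a : List Int) (b : Int) (out : Int) : Decidable (Spec_solve a b out) := by unfold Spec_solve; infer_instance

-- ===== CLAIM (what is proved, stated in full; the proofs are below) =====
def Claim_equal_solve : Prop := ∀ (a : List Int) (b : Int), Dom_solve a b → Pre_solve a b → Spec_solve a b (solve a b)

-- ===== LEMMAS AND PROOFS =====

-- the value the digit list denotes
def pvNum : List Int → Int
  | [] => 0
  | x :: xs => x * 10 ^ xs.length + pvNum xs

theorem pv_dvd_sub_mod (a b : Int) : b ∣ a - PySem.Int.mod a b := by
  have h := PySem.Int.floordiv_mul_add_mod a b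
  exact ⟨PySem.Int.floordiv a b, by linarith [mul_comm (PySem.Int.floordiv a b) b]⟩

theorem pv_modeq_mod (a b : Int) : Int.ModEq b (PySem.Int.mod a b) a :=
  Int.modEq_iff_dvd.mpr (pv_dvd_sub_mod a b)

theorem pv_mod_congr {x y b : Int} (hb : b ≠ 0) (h : Int.ModEq b x y) :
    PySem.Int.mod x b = PySem.Int.mod y b := by
  have hd : b ∣ PySem.Int.mod y b - PySem.Int.mod x b := by
    have := ((pv_modeq_mod x b).trans h).trans (pv_modeq_mod y b).symm
    exact Int.ModEq.dvd this
  rcases lt_or_gt_of_ne hb with hneg | hpos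
  · have b1 := PySem.Int.mod_neg_bounds (a := x) hneg
    have b2 := PySem.Int.mod_neg_bounds (a := y) hneg
    have : PySem.Int.mod y b - PySem.Int.mod x b = 0 := by
      refine Int.eq_zero_of_abs_lt_dvd ((Int.neg_dvd).mpr hd) ?_
      rw [abs_lt]; omega
    omega
  · have b1l := PySem.Int.mod_nonneg (a := x) hpos
    have b1r := PySem.Int.mod_lt (a := x) hpos
    have b2l := PySem.Int.mod_nonneg (a := y) hpos
    have b2r := PySem.Int.mod_lt (a := y) hpos
    have : PySem.Int.mod y b - PySem.Int.mod x b = 0 := by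
      refine Int.eq_zero_of_abs_lt_dvd hd ?_
      rw [abs_lt]; omega
    omega

-- B-side invariant: the Horner fold computes pvNum modulo b
theorem pv_alt_inv (b : Int) (hb : b ≠ 0) :
    ∀ (a : List Int) (s : Int),
      a.foldl (fun ans x => PySem.Int.mod (ans * 10 + x) b) (PySem.Int.mod s b)
        = PySem.Int.mod (s * 10 ^ a.length + pvNum a) b := by
  intro a
  induction a with
  | nil => intro s; simp [pvNum]
  | cons x xs ih =>
    intro s
    have hstep : PySem.Int.mod (PySem.Int.mod s b * 10 + x) b
        = PySem.Int.mod (s * 10 + x) b := by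
      exact pv_mod_congr hb (Int.ModEq.add_right x (Int.ModEq.mul_right 10 (pv_modeq_mod s b)))
    calc (x :: xs).foldl (fun ans x => PySem.Int.mod (ans * 10 + x) b) (PySem.Int.mod s b)
        = xs.foldl (fun ans x => PySem.Int.mod (ans * 10 + x) b)
            (PySem.Int.mod (s * 10 + x) b) := by simp [List.foldl_cons, hstep]
      _ = PySem.Int.mod ((s * 10 + x) * 10 ^ xs.length + pvNum xs) b := ih (s * 10 + x)
      _ = PySem.Int.mod (s * 10 ^ (x :: xs).length + pvNum (x :: xs)) b := by
            simp [pvNum]; ring_nf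
      
theorem pv_alt_eq (a : List Int) (b : Int) (hb : b ≠ 0) :
    solve_alt a b = PySem.Int.mod (pvNum a) b := by
  have h0 : (0 : Int) = PySem.Int.mod 0 b := by
    simp [PySem.Int.mod, Int.fmod]
  have := pv_alt_inv b hb a 0
  unfold solve_alt
  rw [h0, this]; simp

-- index-fold → element-fold (right-to-left)
theorem pv_foldr_range_get {β : Type} (g : β → Int → β) (d : Int) :
    ∀ (xs : List Int) (init : β),
      (List.range xs.length).foldr (fun k acc => g acc (xs.getD k d)) init
        = xs.foldr (fun x acc => g acc x) init := by
  intro xs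
  induction xs with
  | nil => intro init; simp
  | cons x xs ih =>
    intro init
    rw [List.length_cons, List.range_succ_eq_map, List.foldr_cons, List.foldr_map]
    simp only [List.getD_cons_succ, List.getD_cons_zero]
    rw [ih init, List.foldr_cons]

-- the A-side step function
def pvStepA (b : Int) (st : Int × Int) (x : Int) : Int × Int :=
  (PySem.Int.mod (PySem.Int.mod st.1 b +
     PySem.Int.mod (PySem.Int.mod x b * st.2) b) b,
   PySem.Int.mod (PySem.Int.mod (PySem.Int.mod st.2 b * 10) b) b)

-- A-side invariant: first component is pvNum mod b, second is ≡ 10^len mod b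
theorem pv_a_inv (b : Int) (hb : b ≠ 0) :
    ∀ (xs : List Int),
      (xs.foldr (fun x st => pvStepA b st x) ((0 : Int), (1 : Int))).1
          = PySem.Int.mod (pvNum xs) b ∧
      Int.ModEq b (xs.foldr (fun x st => pvStepA b st x) ((0 : Int), (1 : Int))).2
          (10 ^ xs.length) := by
  intro xs
  induction xs with
  | nil =>
    constructor
    · simp [pvNum, PySem.Int.mod, Int.fmod]
    · simp
  | cons x xs ih =>
    obtain ⟨ih1, ih2⟩ := ih
    rw [List.foldr_cons]
    set st := xs.foldr (fun x st => pvStepA b st x) ((0 : Int), (1 : Int)) with hst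
    constructor
    · show PySem.Int.mod (PySem.Int.mod st.1 b +
         PySem.Int.mod (PySem.Int.mod x b * st.2) b) b = PySem.Int.mod (pvNum (x :: xs)) b
      apply pv_mod_congr hb
      have h1 : Int.ModEq b (PySem.Int.mod st.1 b) (pvNum xs) :=
        ((pv_modeq_mod st.1 b).trans (by rw [ih1])).trans (pv_modeq_mod (pvNum xs) b)
      have h2 : Int.ModEq b (PySem.Int.mod (PySem.Int.mod x b * st.2) b)
          (x * 10 ^ xs.length) :=
        (pv_modeq_mod _ b).trans (Int.ModEq.mul (pv_modeq_mod x b) ih2)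
      have := h1.add h2
      simpa [pvNum, add_comm] using this
    · show Int.ModEq b (PySem.Int.mod (PySem.Int.mod (PySem.Int.mod st.2 b * 10) b) b)
        (10 ^ (x :: xs).length)
      have h3 : Int.ModEq b (PySem.Int.mod (PySem.Int.mod (PySem.Int.mod st.2 b * 10) b) b)
          (st.2 * 10) :=
        ((pv_modeq_mod _ b).trans (pv_modeq_mod _ b)).trans
          (Int.ModEq.mul_right 10 (pv_modeq_mod st.2 b))
      have h4 : Int.ModEq b (st.2 * 10) (10 ^ (x :: xs).length) := by
        have := Int.ModEq.mul_right 10 ih2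
        simpa [pow_succ] using this
      exact h3.trans h4

-- A reduces to the element-wise foldr of pvStepA
theorem pv_a_eq (a : List Int) (b : Int) :
    solve a b = (a.foldr (fun x st => pvStepA b st x) ((0 : Int), (1 : Int))).1 := by
  unfold solve
  simp only [PySem.List.len_eq]
  have hr : PySem.List.pyRange ((a.length : Int) - 1) (-1) (-1)
      = (PySem.List.pyRange 0 (a.length : Int) 1).reverse := by
    rw [PySem.List.pyRange_neg_one_eq_reverse]
    norm_num
  rw [hr, List.foldl_reverse, PySem.List.pyRange_one]
  have hn : (((a.length : Int)) - 0).toNat = a.length := by omega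
  rw [hn, List.foldr_map]
  have hbody : (fun (k : Nat) (st : Int × Int) =>
      (PySem.Int.mod (PySem.Int.mod st.1 b +
         PySem.Int.mod (PySem.Int.mod (PySem.List.pyGetD a ((0 : Int) + (k : Int)) 0) b * st.2) b) b,
       PySem.Int.mod (PySem.Int.mod (PySem.Int.mod st.2 b * 10) b) b))
      = (fun (k : Nat) (st : Int × Int) => pvStepA b st (a.getD k 0)) := by
    funext k st
    simp [pvStepA]
  rw [hbody, pv_foldr_range_get (fun st x => pvStepA b st x) 0 a]

theorem solve_spec : Claim_equal_solve := by
  unfold Claim_equal_solve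
  intro a b _ hpre
  unfold Spec_solve
  rcases hpre with rfl | hb
  · simp [solve, solve_alt, PySem.List.pyRange_neg_one_eq_nil]
  · rw [pv_alt_eq a b hb, pv_a_eq a b, (pv_a_inv b hb a).1]
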